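-- pv_equiv track=rewrite | github.com/VirtualSteveShow/meta-horizon-plus-catalog | tools/generate_atlas.py | genre_group
-- ===== SOURCE A (Python) =====
-- def genre_group(genre):
--     g = genre.lower()
--     if any(x in g for x in ['shooter','fps','tactical','survival']): return 'Shooter'
--     if any(x in g for x in ['puzzle','mystery']):                    return 'Puzzle'
--     if any(x in g for x in ['sport','golf','cricket','soccer',
--                               'boxing','bowling','fishing']):         return 'Sports'
--     if any(x in g for x in ['rhythm','music']):                      return 'Rhythm'
--     if any(x in g for x in ['rpg','roguelike','roguelite']):         return 'RPG'
--     if any(x in g for x in ['strategy','tower','tabletop','naval']): return 'Strategy'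
--     if any(x in g for x in ['fitness','workout']):                   return 'Fitness'
--     if any(x in g for x in ['sim','simulation']):                    return 'Simulation'
--     if any(x in g for x in ['adventure','narrative','exploration']): return 'Adventure'
--     if 'action' in g:                                                 return 'Action'
--     if any(x in g for x in ['racing','arcade']):                     return 'Arcade'
--     if any(x in g for x in ['education','creative','social',
--                               'casual','platformer']):                return 'Casual'
--     return 'Other'
-- ===== SOURCE B (Python) =====
-- # Flat keyword -> (priority, label) map; single pass keeping the minimum-priority hit.
-- KW = {
--     'shooter': (0, 'Shooter'), 'fps': (0, 'Shooter'), 'tactical': (0, 'Shooter'), 'survival': (0, 'Shooter'),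
--     'puzzle': (1, 'Puzzle'), 'mystery': (1, 'Puzzle'),
--     'sport': (2, 'Sports'), 'golf': (2, 'Sports'), 'cricket': (2, 'Sports'), 'soccer': (2, 'Sports'),
--     'boxing': (2, 'Sports'), 'bowling': (2, 'Sports'), 'fishing': (2, 'Sports'),
--     'rhythm': (3, 'Rhythm'), 'music': (3, 'Rhythm'),
--     'rpg': (4, 'RPG'), 'roguelike': (4, 'RPG'), 'roguelite': (4, 'RPG'),
--     'strategy': (5, 'Strategy'), 'tower': (5, 'Strategy'), 'tabletop': (5, 'Strategy'), 'naval': (5, 'Strategy'),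
--     'fitness': (6, 'Fitness'), 'workout': (6, 'Fitness'),
--     'sim': (7, 'Simulation'), 'simulation': (7, 'Simulation'),
--     'adventure': (8, 'Adventure'), 'narrative': (8, 'Adventure'), 'exploration': (8, 'Adventure'),
--     'action': (9, 'Action'),
--     'racing': (10, 'Arcade'), 'arcade': (10, 'Arcade'),
--     'education': (11, 'Casual'), 'creative': (11, 'Casual'), 'social': (11, 'Casual'),
--     'casual': (11, 'Casual'), 'platformer': (11, 'Casual'),
-- }
--
-- def genre_group(genre):
--     g = genre.lower()
--     best = None
--     for kw, (p, label) in KW.items():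
--         if kw in g and (best is None or p < best[0]):
--             best = (p, label)
--     return best[1] if best is not None else 'Other'
-- ===== Notes on version B (the rewrite author's own statement) =====
-- stated objective: alternative
-- what changed: Replaces the short-circuiting chain of per-category any() tests by a single pass over a flat keyword->(priority,label) map that keeps the minimum-priority hit; correctness rests on the first matching category being the one of minimal priority.
import Mathlib
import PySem

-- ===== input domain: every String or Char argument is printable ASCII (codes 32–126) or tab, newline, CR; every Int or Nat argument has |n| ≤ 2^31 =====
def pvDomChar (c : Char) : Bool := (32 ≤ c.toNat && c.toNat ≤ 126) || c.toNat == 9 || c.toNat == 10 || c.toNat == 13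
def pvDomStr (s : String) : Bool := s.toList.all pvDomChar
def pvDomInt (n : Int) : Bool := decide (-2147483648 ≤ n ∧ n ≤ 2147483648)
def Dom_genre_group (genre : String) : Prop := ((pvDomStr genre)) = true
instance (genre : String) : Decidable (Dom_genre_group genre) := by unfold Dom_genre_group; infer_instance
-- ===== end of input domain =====

-- B replaces A's short-circuiting chain of per-category any() tests by a single pass over a
-- flat keyword->(priority,label) table keeping the minimum-priority hit (alternative, same cost).

-- ===== PORT A =====
def genre_group (genre : String) : String :=
  let g := PySem.Str.lower genre
  if (["shooter","fps","tactical","survival"].any (fun x => PySem.Str.isIn x g)) then "Shooter"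
  else if (["puzzle","mystery"].any (fun x => PySem.Str.isIn x g)) then "Puzzle"
  else if (["sport","golf","cricket","soccer","boxing","bowling","fishing"].any (fun x => PySem.Str.isIn x g)) then "Sports"
  else if (["rhythm","music"].any (fun x => PySem.Str.isIn x g)) then "Rhythm"
  else if (["rpg","roguelike","roguelite"].any (fun x => PySem.Str.isIn x g)) then "RPG"
  else if (["strategy","tower","tabletop","naval"].any (fun x => PySem.Str.isIn x g)) then "Strategy"
  else if (["fitness","workout"].any (fun x => PySem.Str.isIn x g)) then "Fitness"
  else if (["sim","simulation"].any (fun x => PySem.Str.isIn x g)) then "Simulation"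
  else if (["adventure","narrative","exploration"].any (fun x => PySem.Str.isIn x g)) then "Adventure"
  else if PySem.Str.isIn "action" g then "Action"
  else if (["racing","arcade"].any (fun x => PySem.Str.isIn x g)) then "Arcade"
  else if (["education","creative","social","casual","platformer"].any (fun x => PySem.Str.isIn x g)) then "Casual"
  else "Other"

-- ===== PORT B =====
-- Flat keyword -> (priority, label) table (Python dict KW, in insertion order).
def genreKW : List (String × Nat × String) :=
  [("shooter",0,"Shooter"),("fps",0,"Shooter"),("tactical",0,"Shooter"),("survival",0,"Shooter"),
   ("puzzle",1,"Puzzle"),("mystery",1,"Puzzle"),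
   ("sport",2,"Sports"),("golf",2,"Sports"),("cricket",2,"Sports"),("soccer",2,"Sports"),
   ("boxing",2,"Sports"),("bowling",2,"Sports"),("fishing",2,"Sports"),
   ("rhythm",3,"Rhythm"),("music",3,"Rhythm"),
   ("rpg",4,"RPG"),("roguelike",4,"RPG"),("roguelite",4,"RPG"),
   ("strategy",5,"Strategy"),("tower",5,"Strategy"),("tabletop",5,"Strategy"),("naval",5,"Strategy"),
   ("fitness",6,"Fitness"),("workout",6,"Fitness"),
   ("sim",7,"Simulation"),("simulation",7,"Simulation"),
   ("adventure",8,"Adventure"),("narrative",8,"Adventure"),("exploration",8,"Adventure"),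
   ("action",9,"Action"),
   ("racing",10,"Arcade"),("arcade",10,"Arcade"),
   ("education",11,"Casual"),("creative",11,"Casual"),("social",11,"Casual"),
   ("casual",11,"Casual"),("platformer",11,"Casual")]

-- one step of B's loop: keep the hit of minimal priority
def genreStep (g : String) (acc : Option (Nat × String)) (e : String × Nat × String) : Option (Nat × String) :=
  if PySem.Str.isIn e.1 g then
    match acc with
    | none => some (e.2.1, e.2.2)
    | some (q, m) => if e.2.1 < q then some (e.2.1, e.2.2) else some (q, m)
  else acc

def genre_group_alt (genre : String) : String :=
  let g := PySem.Str.lower genre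
  match genreKW.foldl (genreStep g) none with
  | some (_, label) => label
  | none => "Other"

-- ===== PRECONDITION & SPEC =====
def Spec_genre_group (genre : String) (out : String) : Prop := out = genre_group_alt genre
instance (genre : String) (out : String) : Decidable (Spec_genre_group genre out) := by unfold Spec_genre_group; infer_instance

-- ===== CLAIM (what is proved, stated in full; the proofs are below) =====
def Claim_equal_genre_group : Prop := ∀ (genre : String), Dom_genre_group genre → Spec_genre_group genre (genre_group genre)

-- ===== LEMMAS AND PROOFS =====

-- grouped view of the table, for the proof only
def genreGroups : List (List String × Nat × String) :=
  [(["shooter","fps","tactical","survival"],0,"Shooter"),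
   (["puzzle","mystery"],1,"Puzzle"),
   (["sport","golf","cricket","soccer","boxing","bowling","fishing"],2,"Sports"),
   (["rhythm","music"],3,"Rhythm"),
   (["rpg","roguelike","roguelite"],4,"RPG"),
   (["strategy","tower","tabletop","naval"],5,"Strategy"),
   (["fitness","workout"],6,"Fitness"),
   (["sim","simulation"],7,"Simulation"),
   (["adventure","narrative","exploration"],8,"Adventure"),
   (["action"],9,"Action"),
   (["racing","arcade"],10,"Arcade"),
   (["education","creative","social","casual","platformer"],11,"Casual")]

-- the first group (in order) with a matching keyword
def firstHit (g : String) : List (List String × Nat × String) → Option (Nat × String)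
  | [] => none
  | (kws, p, l) :: rest =>
      if kws.any (fun k => PySem.Str.isIn k g) then some (p, l) else firstHit g rest

-- first-match chain, as A computes it
def firstLabel (g : String) : List (List String × Nat × String) → String
  | [] => "Other"
  | (kws, _, l) :: rest =>
      if kws.any (fun k => PySem.Str.isIn k g) then l else firstLabel g rest

-- once the accumulator holds a priority ≤ every remaining priority, the fold is constant
theorem genreStep_absorb (g : String) (q : Nat) (m : String)
    (l : List (String × Nat × String)) (h : ∀ e ∈ l, q ≤ e.2.1) :
    l.foldl (genreStep g) (some (q, m)) = some (q, m) := by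
  induction l with
  | nil => rfl
  | cons e t ih =>
    have hq : q ≤ e.2.1 := h e (by simp)
    have hstep : genreStep g (some (q, m)) e = some (q, m) := by
      unfold genreStep
      split
      · simp [Nat.not_lt.mpr hq]
      · rfl
    simp only [List.foldl, hstep]
    exact ih (fun e' he' => h e' (by simp [he']))

-- folding one same-priority group from an empty accumulator
theorem genreStep_group (g : String) (p : Nat) (l : String) (kws : List String) :
    (kws.map (fun k => (k, p, l))).foldl (genreStep g) none
      = if kws.any (fun k => PySem.Str.isIn k g) then some (p, l) else none := by
  induction kws with
  | nil => rfl
  | cons k t ih =>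
    by_cases hk : PySem.Str.isIn k g
    · simp only [List.map, List.foldl, List.any_cons, hk, Bool.true_or, if_pos]
      have : genreStep g none (k, p, l) = some (p, l) := by unfold genreStep; rw [if_pos hk]
      rw [this]
      exact genreStep_absorb g p l _ (by simp)
    · simp only [List.map, List.foldl, List.any_cons, hk, Bool.false_or]
      have : genreStep g none (k, p, l) = none := by unfold genreStep; rw [if_neg hk]
      rw [this, ih]

-- with nondecreasing priorities, the min-priority fold is the first match
theorem fold_eq_firstHit (g : String) (groups : List (List String × Nat × String))
    (h : groups.Pairwise (fun a b => a.2.1 ≤ b.2.1)) :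
    (groups.flatMap (fun e => e.1.map (fun k => (k, e.2.1, e.2.2)))).foldl (genreStep g) none
      = firstHit g groups := by
  induction groups with
  | nil => rfl
  | cons e t ih =>
    obtain ⟨kws, p, l⟩ := e
    rw [List.pairwise_cons] at h
    simp only [List.flatMap_cons, List.foldl_append]
    rw [genreStep_group]
    by_cases hm : kws.any (fun k => PySem.Str.isIn k g)
    · rw [if_pos hm]
      have : ∀ e' ∈ t.flatMap (fun e => e.1.map (fun k => (k, e.2.1, e.2.2))), p ≤ e'.2.1 := by
        intro e' he'
        simp only [List.mem_flatMap, List.mem_map] at he'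
        obtain ⟨b, hb, k, _, rfl⟩ := he'
        exact h.1 b hb
      rw [genreStep_absorb g p l _ this]
      simp only [firstHit]
      rw [if_pos hm]
    · rw [if_neg hm, ih h.2]
      simp only [firstHit]
      rw [if_neg hm]

theorem genreKW_flat :
    genreKW = genreGroups.flatMap (fun e => e.1.map (fun k => (k, e.2.1, e.2.2))) := by
  rfl

-- ===== VERDICT (by name: the statement is the Claim_ definition above) =====
theorem firstHit_label (g : String) (groups : List (List String × Nat × String)) :
    (match firstHit g groups with
     | some (_, label) => label
     | none => "Other") = firstLabel g groups := by
  induction groups with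
  | nil => rfl
  | cons e t ih =>
    obtain ⟨kws, p, l⟩ := e
    simp only [firstHit, firstLabel]
    by_cases hm : kws.any (fun k => PySem.Str.isIn k g)
    · rw [if_pos hm, if_pos hm]
    · rw [if_neg hm, if_neg hm, ih]

theorem genre_group_spec : Claim_equal_genre_group := by
  intro genre _
  unfold Spec_genre_group
  simp only [genre_group, genre_group_alt, genreKW_flat]
  rw [fold_eq_firstHit _ _ (by decide), firstHit_label]
  simp only [firstLabel, genreGroups, List.any_cons, List.any_nil, Bool.or_false]
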